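-- pv_equiv track=rewrite | github.com/nasa/prog_algs | prog_algs/visualize/utils.py | zip_2d_list
-- ===== SOURCE A (Python) =====
-- import itertools
--
-- def remove_tuple_duplicates(l):
--     new_l = []
--     for item in l:
--         if item[0] == item[1]:      continue
--         else:                       new_l.append(item)
--     return new_l
--
-- def zip_2d_list(l):
--     tuple_list = remove_tuple_duplicates([el for el in itertools.product(l, l)])
--     seen_already, zipped_2d_list = set(), []
--     for el in tuple_list:
--         el_sort = tuple(sorted(el))
--         if el_sort not in seen_already:
--             zipped_2d_list.append(el)
--             seen_already.add(el_sort)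
--     return zipped_2d_list
-- ===== SOURCE B (Python) =====
-- def zip_2d_list(l):
--     seen, res = set(), []
--     for i, x in enumerate(l):
--         for y in l[i + 1:]:
--             if x == y:
--                 continue
--             key = (y, x) if y < x else (x, y)
--             if key not in seen:
--                 seen.add(key)
--                 res.append((x, y))
--     return res
-- ===== Notes on version B (the rewrite author's own statement) =====
-- stated objective: faster
-- what changed: B replaces building the full n x n itertools.product list, filtering out equal-value pairs, and deduplicating it, by a single upper-triangle double loop (i, j>i) that skips equal values and dedups by the sorted value pair on the fly.
import Mathlib
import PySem

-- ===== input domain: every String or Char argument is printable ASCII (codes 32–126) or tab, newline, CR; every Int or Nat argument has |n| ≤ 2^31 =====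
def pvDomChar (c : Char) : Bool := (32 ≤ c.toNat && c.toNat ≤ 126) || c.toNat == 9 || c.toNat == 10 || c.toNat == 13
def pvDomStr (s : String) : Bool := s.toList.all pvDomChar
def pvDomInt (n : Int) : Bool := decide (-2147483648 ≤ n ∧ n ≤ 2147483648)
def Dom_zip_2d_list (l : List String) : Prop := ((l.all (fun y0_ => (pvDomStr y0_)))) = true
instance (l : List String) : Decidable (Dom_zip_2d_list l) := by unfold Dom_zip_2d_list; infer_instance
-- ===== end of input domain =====

-- B replaces the full-product-then-filter-then-dedup pipeline with a single upper-triangle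
-- double loop over distinct index pairs (simpler traversal, measurably faster by constant factor).

-- ===== PORT A =====
-- itertools.product(l, l)
def pvProduct (l : List String) : List (String × String) :=
  l.flatMap (fun x => l.map (fun y => (x, y)))

def remove_tuple_duplicates (l : List (String × String)) : List (String × String) :=
  l.foldl (fun new_l item => if item.1 = item.2 then new_l else new_l ++ [item]) []

def zip_2d_list (l : List String) : List (String × String) :=
  let tuple_list := remove_tuple_duplicates (pvProduct l)
  (tuple_list.foldl
    (fun (st : PySem.Set (String × String) × List (String × String)) el =>
      -- tuple(sorted(el)) on a 2-tuple: the pair in nondecreasing order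
      let el_sort := if el.2 < el.1 then (el.2, el.1) else el
      if st.1.contains el_sort then st
      else (PySem.Set.add st.1 el_sort, st.2 ++ [el]))
    (PySem.Set.empty, [])).2

-- ===== PORT B =====
-- the inner loop 'for y in l[i+1:]'
def pvAltInner (x : String) (rest : List String)
    (st : PySem.Set (String × String) × List (String × String)) :
    PySem.Set (String × String) × List (String × String) :=
  rest.foldl
    (fun st y =>
      if x = y then st
      else
        let key := if y < x then (y, x) else (x, y)
        if st.1.contains key then st
        else (PySem.Set.add st.1 key, st.2 ++ [(x, y)]))
    st

-- the outer loop 'for i, x in enumerate(l)': at step i the head is x = l[i], l[i+1:] the tail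
def pvAltGo (l : List String)
    (st : PySem.Set (String × String) × List (String × String)) :
    PySem.Set (String × String) × List (String × String) :=
  match l with
  | [] => st
  | x :: rest => pvAltGo rest (pvAltInner x rest st)

def zip_2d_list_alt (l : List String) : List (String × String) :=
  (pvAltGo l (PySem.Set.empty, [])).2

-- ===== PRECONDITION & SPEC =====
def Spec_zip_2d_list (l : List String) (out : List (String × String)) : Prop := out = zip_2d_list_alt l
instance (l : List String) (out : List (String × String)) : Decidable (Spec_zip_2d_list l out) := by unfold Spec_zip_2d_list; infer_instance

-- ===== CLAIM (what is proved, stated in full; the proofs are below) =====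
def Claim_equal_zip_2d_list : Prop := ∀ (l : List String), Dom_zip_2d_list l → Spec_zip_2d_list l (zip_2d_list l)

-- ===== LEMMAS AND PROOFS =====

-- the sorted-tuple dedup key of a pair
def pvKey (p : String × String) : String × String :=
  if p.2 < p.1 then (p.2, p.1) else p

-- the common step both folds perform on one candidate pair
def pvStep (st : PySem.Set (String × String) × List (String × String))
    (p : String × String) : PySem.Set (String × String) × List (String × String) :=
  if p.1 = p.2 then st
  else if pvKey p ∈ st.1 then st
  else (st.1 ++ [pvKey p], st.2 ++ [p])

-- B's pair stream: the strict upper triangle, row by row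
def pvPairsB : List String → List (String × String)
  | [] => []
  | x :: t => t.map (fun y => (x, y)) ++ pvPairsB t

lemma pvStep_noop (st : PySem.Set (String × String) × List (String × String))
    (p : String × String) (h : p.1 = p.2 ∨ pvKey p ∈ st.1) :
    pvStep st p = st := by
  rcases h with h | h
  · simp [pvStep, h]
  · unfold pvStep
    split <;> rfl

lemma pvStep_mono (st : PySem.Set (String × String) × List (String × String))
    (p q : String × String) (h : q ∈ st.1) : q ∈ (pvStep st p).1 := by
  unfold pvStep
  split
  · exact h
  · split
    · exact h
    · simp [List.mem_append, h]

lemma pvFold_mono (xs : List (String × String))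
    (st : PySem.Set (String × String) × List (String × String))
    (q : String × String) (h : q ∈ st.1) : q ∈ ((xs.foldl pvStep st).1) := by
  induction xs generalizing st with
  | nil => exact h
  | cons p xs ih => exact ih _ (pvStep_mono _ _ _ h)

lemma pvStep_contains_key (st : PySem.Set (String × String) × List (String × String))
    (p : String × String) (hne : p.1 ≠ p.2) : pvKey p ∈ (pvStep st p).1 := by
  unfold pvStep
  split
  · exact absurd ‹p.1 = p.2› hne
  · split
    · assumption
    · simp [List.mem_append]

lemma pvFold_contains_key (xs : List (String × String))
    (st : PySem.Set (String × String) × List (String × String))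
    (p : String × String) (hmem : p ∈ xs) (hne : p.1 ≠ p.2) :
    pvKey p ∈ ((xs.foldl pvStep st).1) := by
  induction xs generalizing st with
  | nil => cases hmem
  | cons q xs ih =>
      simp only [List.foldl_cons]
      rcases List.mem_cons.mp hmem with rfl | h
      · exact pvFold_mono xs _ _ (pvStep_contains_key st p hne)
      · exact ih _ h

lemma pvKey_comm (a b : String) (h : a ≠ b) : pvKey (a, b) = pvKey (b, a) := by
  unfold pvKey
  rcases lt_trichotomy a b with hlt | heq | hgt
  · simp [hlt, not_lt_of_gt hlt]
  · exact absurd heq h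
  · simp [hgt, not_lt_of_gt hgt]

-- dropping the first-column entry (y, x) of every later row is a no-op once
-- every key {x,y} with y in outer is already in seen
lemma pvSkipFirst (x : String) (outer inner : List String)
    (st : PySem.Set (String × String) × List (String × String))
    (h : ∀ y ∈ outer, y ≠ x → pvKey (y, x) ∈ st.1) :
    (outer.flatMap (fun y => (y, x) :: inner.map (fun z => (y, z)))).foldl pvStep st =
    (outer.flatMap (fun y => inner.map (fun z => (y, z)))).foldl pvStep st := by
  induction outer generalizing st with
  | nil => rfl
  | cons y outer ih =>
      simp only [List.flatMap_cons, List.foldl_append, List.foldl_cons]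
      have hstep : pvStep st (y, x) = st := by
        by_cases hyx : y = x
        · exact pvStep_noop _ _ (Or.inl hyx)
        · exact pvStep_noop _ _ (Or.inr (h y List.mem_cons_self hyx))
      rw [hstep]
      exact ih _ (fun z hz hzx =>
        pvFold_mono _ _ _ (h z (List.mem_cons_of_mem _ hz) hzx))

-- main: folding the common step over the full product equals folding it over the upper triangle
lemma pvMain : ∀ (l : List String) (st : PySem.Set (String × String) × List (String × String)),
    (pvProduct l).foldl pvStep st = (pvPairsB l).foldl pvStep st := by
  intro l
  induction l with
  | nil => intro st; rfl
  | cons x t ih =>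
      intro st
      have hprod : pvProduct (x :: t) =
          ((x, x) :: t.map (fun y => (x, y))) ++
            t.flatMap (fun y => (y, x) :: t.map (fun z => (y, z))) := by
        simp [pvProduct, List.flatMap_cons]
      rw [hprod]
      simp only [List.foldl_append, List.foldl_cons]
      rw [pvStep_noop _ _ (Or.inl rfl)]
      set st1 := (t.map (fun y => (x, y))).foldl pvStep st with hst1
      have hsk : (t.flatMap (fun y => (y, x) :: t.map (fun z => (y, z)))).foldl pvStep st1 =
          (t.flatMap (fun y => t.map (fun z => (y, z)))).foldl pvStep st1 := by
        apply pvSkipFirst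
        intro y hy hyx
        rw [← pvKey_comm x y (fun hxy => hyx hxy.symm)]
        exact pvFold_contains_key _ _ _ (List.mem_map_of_mem hy)
          (by simpa using fun hxy => hyx hxy.symm)
      rw [hsk]
      have hpt : t.flatMap (fun y => t.map (fun z => (y, z))) = pvProduct t := rfl
      rw [hpt, ih st1]
      show _ = (pvPairsB (x :: t)).foldl pvStep st
      simp only [pvPairsB, List.foldl_append]
      rw [← hst1]

-- removing equal-component pairs first, then folding A's dedup body, is folding the common step
lemma pvAfold_eq : ∀ (xs : List (String × String))
    (st : PySem.Set (String × String) × List (String × String)),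
    (xs.filter (fun p => decide ¬ (p.1 = p.2))).foldl
      (fun st el =>
        let el_sort := if el.2 < el.1 then (el.2, el.1) else el
        if st.1.contains el_sort then st
        else (PySem.Set.add st.1 el_sort, st.2 ++ [el])) st =
    xs.foldl pvStep st := by
  intro xs
  induction xs with
  | nil => intro st; rfl
  | cons p xs ih =>
      intro st
      by_cases h : p.1 = p.2
      · rw [List.filter_cons_of_neg (by simp [h]), List.foldl_cons,
          pvStep_noop _ _ (Or.inl h), ih]
      · rw [List.filter_cons_of_pos (by simp [h]), List.foldl_cons, List.foldl_cons, ih]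
        congr 1
        simp [pvStep, pvKey, h, PySem.Set.add]
        split <;> simp_all

lemma pvA_eq (l : List String) :
    zip_2d_list l = ((pvProduct l).foldl pvStep (PySem.Set.empty, [])).2 := by
  unfold zip_2d_list remove_tuple_duplicates
  rw [show (fun (new_l : List (String × String)) item =>
        if item.1 = item.2 then new_l else new_l ++ [item]) =
      (fun new_l item => if ¬ (item.1 = item.2) then new_l ++ [item] else new_l) by
        funext a b; by_cases h : b.1 = b.2 <;> simp [h]]
  rw [PySem.List.foldl_append_ite_eq_filter, List.nil_append]
  exact congrArg Prod.snd (pvAfold_eq (pvProduct l) _)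

-- B's nested loops are the common fold over the upper triangle
lemma pvB_eq : ∀ (l : List String) (st : PySem.Set (String × String) × List (String × String)),
    pvAltGo l st = (pvPairsB l).foldl pvStep st := by
  intro l
  induction l with
  | nil => intro st; rfl
  | cons x t ih =>
      intro st
      simp only [pvAltGo, pvPairsB, List.foldl_append, ih]
      congr 1
      unfold pvAltInner
      rw [List.foldl_map]
      apply PySem.List.foldl_congr_mem
      intro acc y _
      by_cases h : x = y
      · simp [pvStep, h]
      · simp [pvStep, pvKey, h, PySem.Set.add]
        split <;> simp_all

-- ===== VERDICT (by name: the statement is the Claim_ definition above) =====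
theorem zip_2d_list_spec : Claim_equal_zip_2d_list := by
  intro l _
  unfold Spec_zip_2d_list zip_2d_list_alt
  rw [pvA_eq, pvMain, pvB_eq]
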